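-- pv_equiv track=rewrite | github.com/MaxPastukhov15/EGE | 5/56533.py | f
-- ===== SOURCE A (Python) =====
-- def f(n):
--     for i in range(3):
--         b = bin(n)[2:]
--         s = sum(list(map(int, str(n))))
--         if s % 2 == 0:
--             b += '0'
--         else:
--             b += '1'
--         n = int(b, 2)
--     return n
-- ===== SOURCE B (Python) =====
-- def f(n):
--     # Work on the decimal digit list directly: convert str(n) to digits once,
--     # then three times append the digit-sum parity bit by schoolbook doubling
--     # (2*n + bit computed digit-by-digit with a carry), converting back to an
--     # int only at the very end.  No bin()/int() roundtrip per iteration.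
--     digits = [int(c) for c in str(n)]
--     for _ in range(3):
--         bit = sum(digits) % 2
--         out = []
--         carry = bit
--         for d in reversed(digits):
--             t = 2 * d + carry
--             out.append(t % 10)
--             carry = t // 10
--         if carry:
--             out.append(carry)
--         digits = out[::-1]
--     return int(''.join(map(str, digits)))
-- ===== Notes on version B (the rewrite author's own statement) =====
-- stated objective: alternative
-- what changed: B works on the decimal digit list as its data structure: it converts str(n) to digits once, performs each parity-append step as schoolbook doubling with carry directly on the digit list (no bin()/int(b,2) roundtrip and no re-stringification of n per iteration), and parses back to an int only once at the end.
import Mathlib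
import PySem

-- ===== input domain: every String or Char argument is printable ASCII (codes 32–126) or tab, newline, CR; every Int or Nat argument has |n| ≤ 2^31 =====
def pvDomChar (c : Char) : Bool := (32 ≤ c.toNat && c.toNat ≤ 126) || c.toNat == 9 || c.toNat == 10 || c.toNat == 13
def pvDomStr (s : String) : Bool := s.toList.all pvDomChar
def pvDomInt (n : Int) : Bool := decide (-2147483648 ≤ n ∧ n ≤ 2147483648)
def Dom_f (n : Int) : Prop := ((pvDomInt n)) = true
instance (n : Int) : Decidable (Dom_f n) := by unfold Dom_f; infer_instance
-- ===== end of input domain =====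

-- B replaces the per-iteration bin()/str()/int() roundtrips by schoolbook doubling on a
-- decimal digit list, converting once in and once out; return values agree on all n ≥ 0.
-- Both Pythons raise ValueError on negative n (the '-' sign in str(n)), hence Pre_f.

-- ===== PORT A =====
-- str(n) for n ≥ 0, hand-ported (exact for the n ≥ 0 admitted by Pre_f)
def decChars (k : Nat) : List Char :=
  if h : k < 10 then [Char.ofNat (48 + k)]
  else decChars (k / 10) ++ [Char.ofNat (48 + k % 10)]
decreasing_by exact Nat.div_lt_self (by omega) (by omega)

-- sum(list(map(int, str(n)))) for n ≥ 0 (int(c) on a digit char is its code minus 48)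
def digitSum (n : Int) : Int :=
  ((decChars n.toNat).map (fun c => ((c.toNat : Int) - 48))).sum

-- bin(n)[2:] for n ≥ 0, hand-ported (exact for n ≥ 0)
def binChars (k : Nat) : List Char :=
  if h : k < 2 then [Char.ofNat (48 + k)]
  else binChars (k / 2) ++ [Char.ofNat (48 + k % 2)]
decreasing_by exact Nat.div_lt_self (by omega) (by omega)

-- int(b, 2) for a string of '0'/'1' digit chars, hand-ported (exact on the
-- binary strings A builds; A never reaches it on negative n — it raises earlier)
def parseBin (cs : List Char) : Int :=
  cs.foldl (fun a c => 2 * a + ((c.toNat : Int) - 48)) 0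

-- loop body of A (on n < 0 Python raises; the port's value there is irrelevant, Pre_f excludes it)
def fBody (n : Int) (_i : Int) : Int :=
  let b := binChars n.toNat
  let s := digitSum n
  let b := if PySem.Int.mod s 2 = 0 then b ++ ['0'] else b ++ ['1']
  parseBin b

def f (n : Int) : Int := (PySem.List.pyRange 0 3 1).foldl fBody n

-- ===== PORT B =====
-- one iteration of B's loop: parity bit from the digit list, then schoolbook
-- doubling with carry over reversed(digits), append carry, reverse back
def bStep (digits : List Int) : List Int :=
  let bit := PySem.Int.mod digits.sum 2
  let p := digits.reverse.foldl
      (fun (acc : List Int × Int) d =>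
        let t := 2 * d + acc.2
        (acc.1 ++ [PySem.Int.mod t 10], PySem.Int.floordiv t 10)) ([], bit)
  let out := if p.2 ≠ 0 then p.1 ++ [p.2] else p.1
  out.reverse   -- out[::-1]

-- int(''.join(map(str, digits))), hand-ported (exact on the digit lists B builds)
def parseDec (ds : List Int) : Int :=
  ds.foldl (fun a d => 10 * a + d) 0

def f_alt (n : Int) : Int :=
  -- [int(c) for c in str(n)] (exact for n ≥ 0; on n < 0 Python raises, excluded by Pre_f)
  let digits := (decChars n.toNat).map (fun c => ((c.toNat : Int) - 48))
  parseDec (bStep (bStep (bStep digits)))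

-- ===== PRECONDITION & SPEC =====
-- Python A (and B) raise ValueError on every negative n (int('-') on the sign of str(n))
def Pre_f (n : Int) : Prop := 0 ≤ n
instance (n : Int) : Decidable (Pre_f n) := by unfold Pre_f; infer_instance
def pvWitness_f : Int := 5

def Spec_f (n : Int) (out : Int) : Prop := out = f_alt n
instance (n : Int) (out : Int) : Decidable (Spec_f n out) := by unfold Spec_f; infer_instance

-- ===== CLAIM =====
def Claim_equal_f : Prop := ∀ (n : Int), Dom_f n → Pre_f n → Spec_f n (f n)

-- ===== LEMMAS AND PROOFS =====

-- least-significant-first decimal digits (proof-side model of B's digit lists)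
def revDN (k : Nat) : List Nat :=
  if h : k < 10 then [k] else k % 10 :: revDN (k / 10)
decreasing_by exact Nat.div_lt_self (by omega) (by omega)

-- most-significant-first digit list B starts from
def msdD (k : Nat) : List Int :=
  (decChars k).map (fun c => ((c.toNat : Int) - 48))

theorem charDigit (d : Nat) (h : d < 10) :
    ((Char.ofNat (48 + d)).toNat : Int) - 48 = (d : Int) := by
  interval_cases d <;> decide

theorem msdD_reverse : ∀ k : Nat, (msdD k).reverse = (revDN k).map (Nat.cast) := by
  intro k
  induction k using Nat.strong_induction_on with
  | _ k ih =>
    rw [msdD, decChars, revDN]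
    split
    · next h => simp [charDigit k h]
    · next h =>
      have := ih (k / 10) (Nat.div_lt_self (by omega) (by omega))
      rw [msdD] at this
      simp [this, charDigit (k % 10) (Nat.mod_lt _ (by omega))]

theorem revDN_lt {k : Nat} (h : k < 10) : revDN k = [k] := by
  rw [revDN, dif_pos h]

theorem revDN_ge {k : Nat} (h : ¬ k < 10) : revDN k = k % 10 :: revDN (k / 10) := by
  rw [revDN, dif_neg h]

def sN (k : Nat) : Nat := (revDN k).sum

theorem msdD_sum (k : Nat) : (msdD k).sum = (sN k : Int) := by
  have h := msdD_reverse k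
  have h2 : (msdD k).sum = ((msdD k).reverse).sum := (List.sum_reverse _).symm
  rw [h2, h, sN]
  push_cast
  simp

-- A-side: digitSum equals the cast digit sum
theorem digitSum_eq (k : Nat) : digitSum (k : Int) = (sN k : Int) := by
  rw [digitSum, Int.toNat_natCast]
  exact msdD_sum k

-- arithmetic value of one parity-append step
def stepN (k : Nat) : Nat := 2 * k + sN k % 2

theorem mod2_eq_emod (s : Int) : PySem.Int.mod s 2 = s % 2 :=
  PySem.Int.mod_eq_emod_of_pos (by omega)

-- ---- A's body computes stepN ----
theorem parseBin_append (cs : List Char) (c : Char) :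
    parseBin (cs ++ [c]) = 2 * parseBin cs + ((c.toNat : Int) - 48) := by
  simp [parseBin, List.foldl_append]

theorem parseBin_binChars : ∀ k : Nat, parseBin (binChars k) = (k : Int) := by
  intro k
  induction k using Nat.strong_induction_on with
  | _ k ih =>
    rw [binChars]
    split
    · next h => interval_cases k <;> decide
    · next h =>
      rw [parseBin_append, ih (k / 2) (Nat.div_lt_self (by omega) (by omega))]
      rcases Nat.mod_two_eq_zero_or_one k with h2 | h2 <;>
        · rw [h2]
          have := Nat.div_add_mod k 2
          simp only [show (48:Nat)+0 = 48 from rfl, show (48:Nat)+1 = 49 from rfl]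
          norm_num [show (Char.ofNat 48).toNat = 48 from rfl,
                    show (Char.ofNat 49).toNat = 49 from rfl]
          omega

theorem fBody_eq_stepN (k : Nat) (i : Int) : fBody (k : Int) i = (stepN k : Int) := by
  simp only [fBody]
  rw [digitSum_eq, mod2_eq_emod, Int.toNat_natCast]
  have h2 : ((sN k : Int)) % 2 = ((sN k % 2 : Nat) : Int) := by push_cast; ring
  rw [h2]
  rcases Nat.mod_two_eq_zero_or_one (sN k) with h | h <;>
    · rw [h]
      norm_num [parseBin_append, parseBin_binChars, stepN, h,
                show (('0'.toNat : Int)) - 48 = 0 from by decide,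
                show (('1'.toNat : Int)) - 48 = 1 from by decide]

-- ---- B's step on digit lists ----

-- the fold in bStep, with the accumulated output made explicit
def dblStep (acc : List Int × Int) (d : Int) : List Int × Int :=
  (acc.1 ++ [PySem.Int.mod (2 * d + acc.2) 10], PySem.Int.floordiv (2 * d + acc.2) 10)

def dblRun (rds : List Int) (c : Int) : List Int × Int := rds.foldl dblStep ([], c)

theorem foldl_dblStep_out : ∀ (rds : List Int) (o : List Int) (c : Int),
    rds.foldl dblStep (o, c) = (o ++ (dblRun rds c).1, (dblRun rds c).2) := by
  intro rds
  induction rds with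
  | nil => simp [dblRun]
  | cons d rds ih =>
    intro o c
    simp only [List.foldl_cons, dblStep, dblRun, List.nil_append]
    rw [ih, ih [PySem.Int.mod (2 * d + c) 10]]
    simp

theorem dblRun_cons (d : Int) (rds : List Int) (c : Int) :
    dblRun (d :: rds) c =
      (PySem.Int.mod (2 * d + c) 10 :: (dblRun rds (PySem.Int.floordiv (2 * d + c) 10)).1,
       (dblRun rds (PySem.Int.floordiv (2 * d + c) 10)).2) := by
  rw [dblRun, List.foldl_cons]
  rw [show dblStep ([], c) d =
      ([PySem.Int.mod (2 * d + c) 10], PySem.Int.floordiv (2 * d + c) 10) from rfl]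
  rw [foldl_dblStep_out]
  simp

theorem pymod10 (t : Nat) : PySem.Int.mod ((t : Nat) : Int) 10 = ((t % 10 : Nat) : Int) := by
  exact_mod_cast PySem.Int.mod_natCast t 10

theorem pydiv10 (t : Nat) : PySem.Int.floordiv ((t : Nat) : Int) 10 = ((t / 10 : Nat) : Int) := by
  exact_mod_cast PySem.Int.floordiv_natCast t 10

-- core: schoolbook doubling of the LSD digit list of k with carry-in c ∈ {0,1}
-- yields (after appending the final carry) the LSD digit list of 2*k + c
theorem dbl_revD : ∀ (k : Nat) (c : Nat), c ≤ 1 →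
    (if (dblRun ((revDN k).map Nat.cast) (c : Int)).2 ≠ 0
     then (dblRun ((revDN k).map Nat.cast) (c : Int)).1 ++
            [(dblRun ((revDN k).map Nat.cast) (c : Int)).2]
     else (dblRun ((revDN k).map Nat.cast) (c : Int)).1)
      = (revDN (2 * k + c)).map Nat.cast := by
  intro k
  induction k using Nat.strong_induction_on with
  | _ k ih =>
    intro c hc
    by_cases h : k < 10
    · rw [revDN_lt h]
      simp only [List.map_cons, List.map_nil]
      have hcast : (2 * ((k : Nat) : Int) + (c : Int)) = ((2 * k + c : Nat) : Int) := by
        push_cast; ring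
      rw [dblRun_cons, dblRun, List.foldl_nil, hcast, pymod10, pydiv10]
      by_cases ht : 2 * k + c < 10
      · have h0 : (2 * k + c) / 10 = 0 := Nat.div_eq_of_lt ht
        have hm : (2 * k + c) % 10 = 2 * k + c := Nat.mod_eq_of_lt ht
        rw [revDN_lt ht, h0, hm]
        simp
      · have h1 : (2 * k + c) / 10 = 1 := by omega
        rw [revDN_ge ht, h1, revDN_lt (show (1:Nat) < 10 by omega)]
        norm_num
    · rw [revDN_ge h]
      simp only [List.map_cons]
      have hcast : (2 * ((k % 10 : Nat) : Int) + (c : Int)) = ((2 * (k % 10) + c : Nat) : Int) := by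
        push_cast; ring
      rw [dblRun_cons, hcast, pymod10, pydiv10]
      have ht19 : 2 * (k % 10) + c ≤ 19 := by
        have := Nat.mod_lt k (show 0 < 10 by omega); omega
      have htc : (2 * (k % 10) + c) / 10 ≤ 1 := by omega
      have IH := ih (k / 10) (Nat.div_lt_self (by omega) (by omega))
                    ((2 * (k % 10) + c) / 10) htc
      have hge : ¬ (2 * k + c < 10) := by omega
      rw [revDN_ge hge]
      simp only [List.map_cons]
      have hmod : (2 * k + c) % 10 = (2 * (k % 10) + c) % 10 := by omega
      have hdiv : (2 * k + c) / 10 = 2 * (k / 10) + (2 * (k % 10) + c) / 10 := by omega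
      rw [hmod, hdiv, ← IH]
      split <;> simp_all

-- B's bStep maps canonical (msd-first) digit lists to canonical digit lists
theorem bStep_msdD (k : Nat) : bStep (msdD k) = msdD (stepN k) := by
  simp only [bStep]
  rw [msdD_sum, mod2_eq_emod]
  have hbit : ((sN k : Int)) % 2 = ((sN k % 2 : Nat) : Int) := by push_cast; ring
  rw [msdD_reverse, hbit]
  have h := dbl_revD k (sN k % 2) (by omega)
  rw [show (fun (acc : List Int × Int) (d : Int) =>
        (acc.1 ++ [PySem.Int.mod (2 * d + acc.2) 10], PySem.Int.floordiv (2 * d + acc.2) 10))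
        = dblStep from rfl]
  unfold dblRun at h
  rw [h, ← msdD_reverse, List.reverse_reverse]
  rfl

theorem parseDec_append (ds : List Int) (d : Int) :
    parseDec (ds ++ [d]) = 10 * parseDec ds + d := by
  simp [parseDec, List.foldl_append]

theorem parseDec_msdD : ∀ k : Nat, parseDec (msdD k) = (k : Int) := by
  intro k
  induction k using Nat.strong_induction_on with
  | _ k ih =>
    rw [msdD, decChars]
    split
    · next h =>
      simp only [List.map_cons, List.map_nil]
      rw [show parseDec [((Char.ofNat (48+k)).toNat : Int) - 48] =
            ((Char.ofNat (48+k)).toNat : Int) - 48 by simp [parseDec]]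
      rw [charDigit k h]
    · next h =>
      rw [List.map_append]
      rw [show ((decChars (k / 10)).map fun c => ((c.toNat : Int) - 48)) = msdD (k / 10) from rfl]
      simp only [List.map_cons, List.map_nil]
      rw [parseDec_append, ih (k / 10) (Nat.div_lt_self (by omega) (by omega)),
          charDigit (k % 10) (Nat.mod_lt _ (by omega))]
      have := Nat.div_add_mod k 10
      push_cast
      omega

-- ===== VERDICT =====
theorem f_spec : Claim_equal_f := by
  intro n _ hn
  unfold Spec_f f
  simp only [f_alt]
  have hr : PySem.List.pyRange 0 3 1 = [0, 1, 2] := by decide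
  rw [hr]
  simp only [List.foldl]
  obtain ⟨k, rfl⟩ : ∃ k : Nat, n = (k : Int) := ⟨n.toNat, (Int.toNat_of_nonneg hn).symm⟩
  rw [fBody_eq_stepN k 0, fBody_eq_stepN _ 1, fBody_eq_stepN _ 2]
  rw [show ((decChars ((k : Int)).toNat).map fun c => ((c.toNat : Int) - 48)) =
        msdD ((k : Int)).toNat from rfl]
  rw [Int.toNat_natCast, bStep_msdD, bStep_msdD, bStep_msdD, parseDec_msdD]
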